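-- pv_equiv track=rewrite | github.com/The-X-School/Filtering-Techniques | preselect+inappropriate_jason.py | preselect_filter
-- ===== SOURCE A (Python) =====
-- def preselect_filter(text: str) -> bool:
--     """
--     Quickly filter out obviously low-quality or irrelevant text.
--     Returns True if the sample should be KEPT, False if it should be DISCARDED.
--     """
--     if not text:
--         return False
--
--     # 1. Check length
--     if len(text) < 15 or len(text) > 4000:
--         return False
--
--     # 2. Check for mostly numbers (e.g., phone numbers, IDs)
--     num_digits = sum(c.isdigit() for c in text)
--     if num_digits / len(text) > 0.5:
--         return False
--
--     # 3. Check for low alphanumeric content (e.g., symbol spam)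
--     alnum_chars = sum(c.isalnum() for c in text)
--     if alnum_chars / len(text) < 0.6:
--         return False
--
--     # 4. Check for single repeating characters (e.g., "aaaaaaa...")
--     if len(set(text.lower())) <= 2 and len(text) > 10:
--         return False
--
--     return True
-- ===== SOURCE B (Python) =====
-- def preselect_filter(text: str) -> bool:
--     """
--     Histogram-based re-implementation: build a character frequency table in
--     one pass, then derive the digit count, the alphanumeric count and the
--     case-folded diversity from the (few) distinct keys of the table; the
--     ratio thresholds are tested with exact integer arithmetic and the
--     keep-decision is one conjunction instead of an early-return chain.
--     """
--     n = len(text)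
--     if not (15 <= n <= 4000):
--         return False
--     freq = {}
--     for c in text:
--         freq[c] = freq.get(c, 0) + 1
--     digits = sum(k for c, k in freq.items() if c.isdigit())
--     alnum = sum(k for c, k in freq.items() if c.isalnum())
--     distinct = len({c.lower() for c in freq})
--     return 2 * digits <= n and 5 * alnum >= 3 * n and distinct > 2
-- ===== Notes on version B (the rewrite author's own statement) =====
-- stated objective: alternative
-- what changed: B builds a character-frequency table (dict) in one pass and derives the digit count, alnum count and case-folded diversity from the table's distinct keys instead of A's three separate full-text passes; the float ratio tests become exact integer comparisons and the early-return chain becomes one keep-conjunction.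
import Mathlib
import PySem

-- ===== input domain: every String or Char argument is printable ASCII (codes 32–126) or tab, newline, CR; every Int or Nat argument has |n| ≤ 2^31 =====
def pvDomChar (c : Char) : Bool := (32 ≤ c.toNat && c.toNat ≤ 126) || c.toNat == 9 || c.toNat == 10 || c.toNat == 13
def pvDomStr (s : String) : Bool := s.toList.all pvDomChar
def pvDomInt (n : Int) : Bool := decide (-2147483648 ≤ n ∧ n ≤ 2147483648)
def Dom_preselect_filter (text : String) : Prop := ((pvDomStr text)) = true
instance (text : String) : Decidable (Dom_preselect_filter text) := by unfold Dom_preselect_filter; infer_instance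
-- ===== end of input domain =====

-- B replaces A's three full-text passes by one character-frequency table from whose
-- distinct keys the digit count, alnum count and case-folded diversity are derived;
-- exact integer threshold tests, same result on every input, no speed claim.

-- ===== PORT A =====
-- The two float ratio tests are ported as the exactly equivalent integer comparisons:
-- with len(text) ≤ 4000, `num_digits/len > 0.5` iff 2*num_digits > len and
-- `alnum/len < 0.6` iff 5*alnum < 3*len (rationals with denominator ≤ 20000 never
-- round across those float boundaries; 3/5 itself compares equal-not-less to the
-- double 0.6's rounding, so the equality case also agrees).
def preselect_filter (text : String) : Bool :=
  let cs := text.toList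
  if cs.isEmpty then false
  else if cs.length < 15 || cs.length > 4000 then false
  else
    -- pass 1: num_digits = sum(c.isdigit() for c in text)
    let num_digits := (cs.map (fun c => if PySem.Chars.isdigit c then 1 else 0)).sum
    if 2 * num_digits > cs.length then false
    else
      -- pass 2: alnum_chars = sum(c.isalnum() for c in text)
      let alnum_chars := (cs.map (fun c => if PySem.Chars.isalnum c then 1 else 0)).sum
      if 5 * alnum_chars < 3 * cs.length then false
      -- pass 3: len(set(text.lower())) <= 2 and len(text) > 10
      else if PySem.Set.len (PySem.Set.ofList (PySem.Chars.lower cs)) ≤ 2 && cs.length > 10 then false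
      else true

-- ===== PORT B =====
-- frequency table, then the three statistics read off its distinct keys
def preselect_filter_alt (text : String) : Bool :=
  let cs := text.toList
  let n := cs.length
  if !(15 ≤ n && n ≤ 4000) then false
  else
    -- for c in text: freq[c] = freq.get(c, 0) + 1
    let freq := cs.foldl (fun (d : PySem.Dict Char Int) c => d.insert c (d.getD c 0 + 1)) PySem.Dict.empty
    let digits := ((freq.items.filter (fun kv => PySem.Chars.isdigit kv.1)).map (·.2)).sum
    let alnum := ((freq.items.filter (fun kv => PySem.Chars.isalnum kv.1)).map (·.2)).sum
    let distinct := PySem.Set.len (PySem.Set.ofList (freq.keys.map PySem.Chars.lowerChar))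
    decide (2 * digits ≤ (n : Int)) && (decide (5 * alnum ≥ 3 * (n : Int)) && decide (distinct > 2))

-- ===== PRECONDITION & SPEC =====
def Spec_preselect_filter (text : String) (out : Bool) : Prop := out = preselect_filter_alt text
instance (text : String) (out : Bool) : Decidable (Spec_preselect_filter text out) := by unfold Spec_preselect_filter; infer_instance

-- ===== CLAIM (what is proved, stated in full; the proofs are below) =====
def Claim_equal_preselect_filter : Prop := ∀ (text : String), Dom_preselect_filter text → Spec_preselect_filter text (preselect_filter text)

-- ===== LEMMAS AND PROOFS =====

-- indicator sums are countP
theorem pvSum_indicator (p : Char → Bool) (cs : List Char) :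
    (cs.map (fun c => if p c then 1 else 0)).sum = cs.countP p := by
  induction cs with
  | nil => rfl
  | cons c cs ih => by_cases h : p c <;> simp [h, ih, Nat.add_comm]

-- PySem's first-occurrence dedup is a permutation of Mathlib's dedup
theorem pvPerm_ofList_dedup (xs : List Char) : (PySem.Set.ofList xs).Perm xs.dedup := by
  rw [List.perm_ext_iff_of_nodup (PySem.Set.nodup_ofList xs) xs.nodup_dedup]
  intro a; simp [PySem.Set.mem_ofList]

theorem pvSum_map_intCast (l : List Char) (g : Char → Nat) :
    (l.map (fun x => (g x : Int))).sum = ((l.map g).sum : Int) := by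
  induction l with
  | nil => rfl
  | cons x l ih => simp [ih]

-- the filtered value-sum over a counter is the countP of the underlying list
theorem pvCounter_filter_sum (p : Char → Bool) (cs : List Char) :
    (((PySem.Dict.counter cs).items.filter (fun kv => p kv.1)).map (·.2)).sum
      = (cs.countP p : Int) := by
  rw [PySem.Dict.items_counter, List.filter_map, List.map_map]
  rw [show ((fun kv : Char × Int => p kv.1) ∘
        fun k => ((k, (cs.count k : Int)) : Char × Int)) = p from rfl]
  have hperm : ((PySem.Set.ofList cs).filter p).Perm (cs.dedup.filter p) :=
    (pvPerm_ofList_dedup cs).filter _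
  have hstep :
      (((PySem.Set.ofList cs).filter p).map ((·.2) ∘
          fun k => ((k, (cs.count k : Int)) : Char × Int))).sum
        = ((cs.dedup.filter p).map (fun k => (cs.count k : Int))).sum := by
    rw [show ((·.2) ∘ fun k => ((k, (cs.count k : Int)) : Char × Int))
          = fun k => (cs.count k : Int) from rfl]
    exact (hperm.map _).sum_eq
  rw [hstep, pvSum_map_intCast, List.sum_map_count_dedup_filter_eq_countP p cs]

-- two nodup lists with the same members have the same length
theorem pvDistinct_eq (cs : List Char) :
    PySem.Set.len (PySem.Set.ofList ((PySem.Set.ofList cs).map PySem.Chars.lowerChar))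
      = PySem.Set.len (PySem.Set.ofList (PySem.Chars.lower cs)) := by
  have hl : PySem.Chars.lower cs = cs.map PySem.Chars.lowerChar := by
    simp [PySem.Chars.lower]
  rw [hl]
  have hp : (PySem.Set.ofList ((PySem.Set.ofList cs).map PySem.Chars.lowerChar)).Perm
      (PySem.Set.ofList (cs.map PySem.Chars.lowerChar)) := by
    rw [List.perm_ext_iff_of_nodup (PySem.Set.nodup_ofList _) (PySem.Set.nodup_ofList _)]
    intro a
    simp [PySem.Set.mem_ofList]
  simp only [PySem.Set.len, hp.length_eq]

-- ===== VERDICT (by name: the statement is the Claim_ definition above) =====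
theorem preselect_filter_spec : Claim_equal_preselect_filter := by
  intro text _
  unfold Spec_preselect_filter preselect_filter preselect_filter_alt
  simp only [PySem.Dict.foldl_insert_getD_add_one_eq_counter,
    pvCounter_filter_sum, PySem.Dict.keys_counter, pvDistinct_eq, pvSum_indicator]
  set cs := text.toList with hcs
  set n := cs.length with hn
  set D := cs.countP PySem.Chars.isdigit with hD
  set A := cs.countP PySem.Chars.isalnum with hA
  set L := PySem.Set.len (PySem.Set.ofList (PySem.Chars.lower cs)) with hL
  clear_value L A D n cs
  by_cases hr : 15 ≤ n ∧ n ≤ 4000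
  · have hne : cs ≠ [] := by
      intro h; rw [h] at hn; simp at hn; omega
    have hne' : cs.isEmpty = false := by simp [hne]
    rw [hne']
    simp only [Bool.false_eq_true, if_false]
    split_ifs with g1 g2 g3 g4 <;>
      simp_all <;> omega
  · have hg : (!(decide (15 ≤ n) && decide (n ≤ 4000))) = true := by simp; omega
    rw [hg, if_pos rfl]
    by_cases he : cs.isEmpty
    · simp [he]
    · simp only [he, Bool.false_eq_true, if_false]
      rw [if_pos (show (decide (n < 15) || decide (n > 4000)) = true by simp; omega)]
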